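-- pv_equiv track=rewrite | github.com/RShibaike/anti_bingo | from_now/アンチビンゴ機械学習.py | point
-- ===== SOURCE A (Python) =====
-- def bingo(x):
--     #counter変数初期化
--     counter=0
--     #横列
--     for n in x:
--         if n.count(0)==5:
--             counter=1
--     #line変数初期化
--     line=[0 for i in range(5)]
--     #縦列
--     for n in range(5):
--         for m in range(5):
--             line[m]=x[m][n]
--         if line.count(0)==5:
--             counter=1
--     #右斜め列
--     for n in range(5):
--         line[n]=x[n][n]
--     if line.count(0)==5:
--         counter=1
--     #左斜め列
--     for n in range(5):
--         line[n]=x[4-n][n]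
--     if line.count(0)==5:
--         counter=1
--
--     return counter
--
-- def point(x):
--     counter=0
--     if bingo(x)==1:
--         return 0
--     else:
--         numbers_of_bingo=[]
--         for n in x:numbers_of_bingo+=n
--         while 0 in numbers_of_bingo:
--             numbers_of_bingo.remove(0)
--             counter+=1
--         return counter
-- ===== SOURCE B (Python) =====
-- def point(x):
--     # Build the 12 candidate bingo lines explicitly, then one unified check;
--     # count zeros by direct summation instead of a destructive while/remove loop.
--     cols = [[x[m][n] for m in range(5)] for n in range(5)]
--     diag1 = [x[n][n] for n in range(5)]
--     diag2 = [x[4 - n][n] for n in range(5)]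
--     lines = list(x) + cols + [diag1, diag2]
--     if any(line.count(0) == 5 for line in lines):
--         return 0
--     return sum(row.count(0) for row in x)
-- ===== Notes on version B (the rewrite author's own statement) =====
-- stated objective: simpler
-- what changed: B builds one explicit table of the 12 candidate lines (rows, columns, both diagonals) and applies a single any/count check, replacing A's four separate buffer-reusing loops; the zero count is a direct sum(row.count(0)) instead of A's destructive while/remove loop.
import Mathlib
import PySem

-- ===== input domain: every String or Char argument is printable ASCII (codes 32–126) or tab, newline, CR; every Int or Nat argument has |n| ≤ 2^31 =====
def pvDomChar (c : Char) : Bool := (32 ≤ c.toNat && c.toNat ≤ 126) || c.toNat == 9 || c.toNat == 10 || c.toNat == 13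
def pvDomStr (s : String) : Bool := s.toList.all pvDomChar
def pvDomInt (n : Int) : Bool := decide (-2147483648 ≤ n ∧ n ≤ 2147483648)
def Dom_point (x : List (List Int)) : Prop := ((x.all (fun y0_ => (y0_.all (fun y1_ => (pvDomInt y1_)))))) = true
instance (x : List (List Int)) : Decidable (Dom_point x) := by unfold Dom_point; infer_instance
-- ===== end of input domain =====

-- B changes decomposition only (a lines table + direct summation); RETURN value proved equal on Pre_.

-- ===== PORT A =====
-- x[m][n]; total form of Python's indexing, exact on Pre_ (indices in range there)
def getI (x : List (List Int)) (m n : Int) : Int :=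
  PySem.List.pyGetD (PySem.List.pyGetD x m []) n 0

-- one iteration of the 縦列 loop: rebuild line in place, then check it
def colStep (x : List (List Int)) (s : Int × List Int) (n : Int) : Int × List Int :=
  let line := (PySem.List.pyRange 0 5 1).foldl
      (fun l m => PySem.List.pySetD l m (getI x m n)) s.2
  (if PySem.List.count line 0 = 5 then 1 else s.1, line)

def bingoA (x : List (List Int)) : Int :=
  -- 横列 (rows)
  let counter : Int := x.foldl (fun c n => if PySem.List.count n 0 = 5 then 1 else c) 0
  -- line = [0 for i in range(5)]
  let line : List Int := (List.range 5).map (fun _ => (0 : Int))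
  -- 縦列 (columns)
  let s := (PySem.List.pyRange 0 5 1).foldl (colStep x) (counter, line)
  -- 右斜め列
  let line := (PySem.List.pyRange 0 5 1).foldl
      (fun l n => PySem.List.pySetD l n (getI x n n)) s.2
  let counter := if PySem.List.count line 0 = 5 then 1 else s.1
  -- 左斜め列
  let line := (PySem.List.pyRange 0 5 1).foldl
      (fun l n => PySem.List.pySetD l n (getI x (4 - n) n)) line
  let counter := if PySem.List.count line 0 = 5 then 1 else counter
  counter

-- while 0 in numbers: numbers.remove(0); counter += 1
def zeroLoop (l : List Int) (c : Int) : Int :=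
  if h : (0 : Int) ∈ l then
    match hr : PySem.List.remove? l 0 with
    | some l' => zeroLoop l' (c + 1)
    | none => c
  else c
termination_by l.length
decreasing_by
  have h2 : l.erase 0 = l' := Option.some.inj ((PySem.List.remove?_eq_some_erase l 0 h).symm.trans hr)
  have h3 : l'.length = l.length - 1 := by rw [← h2]; exact List.length_erase_of_mem h
  have h4 : 0 < l.length := List.length_pos_of_mem h
  omega

def point (x : List (List Int)) : Int :=
  if bingoA x = 1 then 0
  else
    let numbers := x.foldl (fun acc n => acc ++ n) ([] : List Int)
    zeroLoop numbers 0

-- ===== PORT B =====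
def point_alt (x : List (List Int)) : Int :=
  let cols := (PySem.List.pyRange 0 5 1).map (fun n =>
      (PySem.List.pyRange 0 5 1).map (fun m => getI x m n))
  let diag1 := (PySem.List.pyRange 0 5 1).map (fun n => getI x n n)
  let diag2 := (PySem.List.pyRange 0 5 1).map (fun n => getI x (4 - n) n)
  let lines := x ++ cols ++ [diag1, diag2]
  if lines.any (fun l => PySem.List.count l 0 = 5) then 0
  else x.foldl (fun s row => s + (PySem.List.count row 0 : Int)) 0

-- ===== PRECONDITION & SPEC =====
-- Pre_ excludes exactly the inputs on which A raises IndexError: boards with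
-- fewer than 5 rows or with one of the first 5 rows shorter than 5.
def Pre_point (x : List (List Int)) : Prop :=
  5 ≤ x.length ∧ ∀ r ∈ x.take 5, 5 ≤ r.length
instance (x : List (List Int)) : Decidable (Pre_point x) := by unfold Pre_point; infer_instance

def pvWitness_point : List (List Int) :=
  [[1, 2, 3, 4, 5], [6, 7, 8, 9, 10], [11, 12, 0, 14, 15], [16, 17, 18, 19, 20], [21, 22, 23, 24, 25]]

def Spec_point (x : List (List Int)) (out : Int) : Prop := out = point_alt x
instance (x : List (List Int)) (out : Int) : Decidable (Spec_point x out) := by unfold Spec_point; infer_instance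

-- ===== CLAIM (what is proved, stated in full; the proofs are below) =====
def Claim_equal_point : Prop := ∀ (x : List (List Int)), Dom_point x → Pre_point x → Spec_point x (point x)

-- ===== LEMMAS AND PROOFS =====

-- A's row/check loops: a fold that latches the counter at 1
theorem foldl_latch {α : Type} (p : α → Prop) [DecidablePred p] :
    ∀ (l : List α) (c : Int),
      l.foldl (fun c n => if p n then 1 else c) c = if l.any (fun n => decide (p n)) then 1 else c := by
  intro l
  induction l with
  | nil => intro c; simp
  | cons hd tl ih =>
    intro c
    simp only [List.foldl_cons, List.any_cons, ih]
    by_cases hp : p hd <;> by_cases ht : tl.any (fun n => decide (p n)) = true <;> simp [hp, ht]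

theorem zeroLoop_eq_aux : ∀ (N : Nat) (l : List Int), l.length ≤ N →
    ∀ (c : Int), zeroLoop l c = c + (l.count 0 : Int) := by
  intro N
  induction N with
  | zero =>
    intro l hl c
    have : l = [] := List.eq_nil_of_length_eq_zero (Nat.le_zero.mp hl)
    subst this
    rw [zeroLoop.eq_def]; simp
  | succ N ih =>
    intro l hl c
    rw [zeroLoop.eq_def]
    by_cases h : (0 : Int) ∈ l
    · simp only [h, dite_true]
      rw [PySem.List.remove?_eq_some_erase l 0 h]
      have hlen := List.length_erase_of_mem h
      show zeroLoop (l.erase 0) (c + 1) = c + (l.count 0 : Int)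
      rw [ih (l.erase 0) (by omega)]
      have hcnt : (l.erase 0).count 0 + 1 = l.count 0 := by
        have := List.count_erase_self (a := (0 : Int)) (l := l)
        have hc : 1 ≤ l.count 0 := List.one_le_count_iff.mpr h
        omega
      push_cast [← hcnt]; ring
    · simp [List.count_eq_zero, h]

theorem zeroLoop_eq (l : List Int) (c : Int) : zeroLoop l c = c + (l.count 0 : Int) :=
  zeroLoop_eq_aux l.length l (le_refl _) c

theorem foldl_append_flatten {α : Type} :
    ∀ (l : List (List α)) (acc : List α), l.foldl (fun a n => a ++ n) acc = acc ++ l.flatten := by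
  intro l
  induction l with
  | nil => simp
  | cons hd tl ih => intro acc; simp [ih, List.append_assoc]

theorem count_sum_eq (x : List (List Int)) :
    x.foldl (fun s row => s + (PySem.List.count row 0 : Int)) 0
      = ((x.foldl (fun acc n => acc ++ n) ([] : List Int)).count 0 : Int) := by
  rw [foldl_append_flatten]
  simp only [List.nil_append]
  induction x with
  | nil => simp
  | cons hd tl ih =>
    rw [List.foldl_cons]
    have : ∀ (l : List (List Int)) (a b : Int),
        l.foldl (fun s row => s + (PySem.List.count row 0 : Int)) (a + b)
          = a + l.foldl (fun s row => s + (PySem.List.count row 0 : Int)) b := by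
      intro l
      induction l with
      | nil => simp
      | cons h2 t2 ih2 => intro a b; simp only [List.foldl_cons]; rw [← ih2, add_assoc]
    rw [show ((0 : Int) + (PySem.List.count hd 0 : Int)) = (PySem.List.count hd 0 : Int) + 0 by ring,
        this, ih]
    simp [PySem.List.count, List.count_append]

-- bingoA as a disjunction of the 12 line conditions (ranges are concrete, so this unfolds)
theorem pyRange5 : PySem.List.pyRange 0 5 1 = [0, 1, 2, 3, 4] := by decide

theorem innerLine (x : List (List Int)) (a b c d e n : Int) :
    List.foldl (fun l m => PySem.List.pySetD l m (getI x m n)) [a, b, c, d, e] [0, 1, 2, 3, 4]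
      = [getI x 0 n, getI x 1 n, getI x 2 n, getI x 3 n, getI x 4 n] := rfl

theorem zeroLine : (List.range 5).map (fun _ => (0 : Int)) = [0, 0, 0, 0, 0] := rfl

theorem colStep_eq (x : List (List Int)) (c a b c' d e n : Int) :
    colStep x (c, [a, b, c', d, e]) n
      = (if PySem.List.count [getI x 0 n, getI x 1 n, getI x 2 n, getI x 3 n, getI x 4 n] 0 = 5
           then 1 else c,
         [getI x 0 n, getI x 1 n, getI x 2 n, getI x 3 n, getI x 4 n]) := by
  simp only [colStep, pyRange5, innerLine]

theorem ite_latch (p : Prop) [Decidable p] (b : Bool) :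
    (if p then (1 : Int) else (if b then 1 else 0)) = if (decide p || b) then 1 else 0 := by
  by_cases hp : p <;> cases b <;> simp [hp]

set_option maxHeartbeats 1000000 in
theorem bingoA_char (x : List (List Int)) :
    bingoA x = if (x ++ ((PySem.List.pyRange 0 5 1).map (fun n =>
          (PySem.List.pyRange 0 5 1).map (fun m => getI x m n)))
        ++ [(PySem.List.pyRange 0 5 1).map (fun n => getI x n n),
            (PySem.List.pyRange 0 5 1).map (fun n => getI x (4 - n) n)]).any
          (fun l => PySem.List.count l 0 = 5) then 1 else 0 := by
  unfold bingoA
  rw [foldl_latch (p := fun n => PySem.List.count n 0 = 5)]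
  rw [pyRange5, zeroLine]
  simp only [List.foldl_cons, List.foldl_nil, colStep_eq,
    List.map_cons, List.map_nil, List.any_append, List.any_cons, List.any_nil]
  have e1 : ∀ (a b c d e : Int),
      PySem.List.pySetD (PySem.List.pySetD (PySem.List.pySetD (PySem.List.pySetD
        (PySem.List.pySetD [a, b, c, d, e] 0 (getI x 0 0)) 1 (getI x 1 1)) 2 (getI x 2 2))
        3 (getI x 3 3)) 4 (getI x 4 4)
      = [getI x 0 0, getI x 1 1, getI x 2 2, getI x 3 3, getI x 4 4] := fun _ _ _ _ _ => rfl
  have e2 : ∀ (a b c d e : Int),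
      PySem.List.pySetD (PySem.List.pySetD (PySem.List.pySetD (PySem.List.pySetD
        (PySem.List.pySetD [a, b, c, d, e] 0 (getI x (4 - 0) 0)) 1 (getI x (4 - 1) 1))
        2 (getI x (4 - 2) 2)) 3 (getI x (4 - 3) 3)) 4 (getI x (4 - 4) 4)
      = [getI x (4 - 0) 0, getI x (4 - 1) 1, getI x (4 - 2) 2, getI x (4 - 3) 3, getI x (4 - 4) 4] :=
    fun _ _ _ _ _ => rfl
  simp only [e1, e2, ite_latch, Bool.or_false]
  refine if_congr ?_ rfl rfl
  simp only [Bool.or_eq_true, decide_eq_true_eq]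
  tauto

-- ===== VERDICT (by name: the statement is the Claim_ definition above) =====
theorem point_spec : Claim_equal_point := by
  intro x _ _
  unfold Spec_point point point_alt
  rw [bingoA_char]
  rw [zeroLoop_eq, ← count_sum_eq]
  split_ifs <;> simp_all
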